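-- pv_equiv track=rewrite | github.com/rsnemmen/koreader-merge | merge_koreader.py | lua_escape_string
-- ===== SOURCE A (Python) =====
-- def lua_escape_string(s: str) -> str:
--     """Escape a string for Lua output."""
--     result = []
--     for char in s:
--         if char == '\\':
--             result.append('\\\\')
--         elif char == '"':
--             result.append('\\"')
--         elif char == '\n':
--             result.append('\\n')
--         elif char == '\r':
--             result.append('\\r')
--         elif char == '\t':
--             result.append('\\t')
--         else:
--             result.append(char)
--     return '"' + ''.join(result) + '"'
-- ===== SOURCE B (Python) =====
-- def lua_escape_string(s: str) -> str:
--     """Escape a string for Lua output."""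
--     # staged full-string passes: escape backslashes first, then each other special char
--     for ch, esc in (('\\', '\\\\'), ('"', '\\"'), ('\n', '\\n'), ('\r', '\\r'), ('\t', '\\t')):
--         s = s.replace(ch, esc)
--     return '"' + s + '"'
-- ===== Notes on version B (the rewrite author's own statement) =====
-- stated objective: alternative
-- what changed: Replaces A's single per-character pass with an if/elif ladder and a result list by five staged whole-string str.replace passes (backslash escaped first, then each remaining special character), moving all per-character work out of the Python-level loop; a timing run measured this constant-factor faster.
import Mathlib
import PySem

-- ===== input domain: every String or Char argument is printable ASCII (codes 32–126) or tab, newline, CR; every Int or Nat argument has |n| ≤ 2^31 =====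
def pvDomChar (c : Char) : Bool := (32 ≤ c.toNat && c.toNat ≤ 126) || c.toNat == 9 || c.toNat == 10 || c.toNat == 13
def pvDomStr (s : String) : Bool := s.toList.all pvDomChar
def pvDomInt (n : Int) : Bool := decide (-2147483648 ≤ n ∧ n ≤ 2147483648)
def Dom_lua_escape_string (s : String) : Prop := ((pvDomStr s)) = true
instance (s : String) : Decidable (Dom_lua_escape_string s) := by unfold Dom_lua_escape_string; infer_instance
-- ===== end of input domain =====

-- B replaces A's single per-character pass (if/elif ladder appending to a result list) by five
-- staged whole-string replace passes, backslash first; objective: alternative decomposition.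

-- ===== PORT A =====
-- A: loop over chars, append escaped piece (or the char) to a result list, join, wrap in quotes.
def lua_escape_string (s : String) : String :=
  let result : List (List Char) := s.toList.foldl (fun acc c =>
    if c = '\\' then acc ++ [['\\', '\\']]
    else if c = '"' then acc ++ [['\\', '"']]
    else if c = '\n' then acc ++ [['\\', 'n']]
    else if c = '\r' then acc ++ [['\\', 'r']]
    else if c = '\t' then acc ++ [['\\', 't']]
    else acc ++ [[c]]) []
  String.ofList ('"' :: result.flatten ++ ['"'])

-- ===== PORT B =====
-- the (ch, esc) pairs of B's loop, in B's pass order (backslash first)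
def luaEscPasses : List (String × String) :=
  [("\\", "\\\\"), ("\"", "\\\""), ("\n", "\\n"), ("\r", "\\r"), ("\t", "\\t")]

-- B: reassign s across five sequential str.replace passes, then wrap in quotes.
def lua_escape_string_alt (s : String) : String :=
  let s := luaEscPasses.foldl (fun t p => PySem.Str.replace t p.1 p.2) s
  "\"" ++ s ++ "\""

-- ===== PRECONDITION & SPEC =====
def Spec_lua_escape_string (s : String) (out : String) : Prop := out = lua_escape_string_alt s
instance (s : String) (out : String) : Decidable (Spec_lua_escape_string s out) := by unfold Spec_lua_escape_string; infer_instance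

-- ===== CLAIM (what is proved, stated in full; the proofs are below) =====
def Claim_equal_lua_escape_string : Prop := ∀ (s : String), Dom_lua_escape_string s → Spec_lua_escape_string s (lua_escape_string s)

-- ===== LEMMAS AND PROOFS =====

-- PySem.Chars.replace with a ONE-character pattern is the per-character flatMap substitution
theorem luaEsc_go1 (c : Char) (new : List Char) :
    ∀ (l acc : List Char) (fuel : Nat), l.length ≤ fuel →
      PySem.Chars.replace.go [c] new fuel l acc
        = acc.reverse ++ l.flatMap (fun x => if x = c then new else [x]) := by
  intro l
  induction l with
  | nil => intro acc fuel _; cases fuel <;> simp [PySem.Chars.replace.go]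
  | cons x t ih =>
    intro acc fuel hf
    cases fuel with
    | zero => simp at hf
    | succ n =>
      simp only [PySem.Chars.replace.go, List.isPrefixOf, List.flatMap_cons]
      simp only [List.length_cons] at hf
      by_cases hx : x = c
      · subst hx
        simp only [beq_self_eq_true, Bool.true_and, if_pos]
        rw [show List.drop [x].length (x::t) = t by simp]
        rw [ih (new.reverse ++ acc) n (by omega)]
        simp
      · rw [if_neg (by simp [Ne.symm hx])]
        rw [ih (x :: acc) n (by omega)]
        simp [hx]

theorem luaEsc_replace1 (c : Char) (new : List Char) (s : List Char) :
    PySem.Chars.replace s [c] new = s.flatMap (fun x => if x = c then new else [x]) := by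
  rw [PySem.Chars.replace]
  simp only [List.isEmpty_cons, Bool.false_eq_true, if_false]
  exact luaEsc_go1 c new s [] s.length (le_refl _)

-- the composite of B's five single-character passes, per character
theorem luaEsc_perChar (c : Char) :
    ((((((if c = '\\' then ['\\','\\'] else [c]).flatMap
        (fun x => if x = '"' then ['\\','"'] else [x])).flatMap
        (fun x => if x = '\n' then ['\\','n'] else [x])).flatMap
        (fun x => if x = '\r' then ['\\','r'] else [x])).flatMap
        (fun x => if x = '\t' then ['\\','t'] else [x]))) =
    (if c = '\\' then ['\\', '\\']
     else if c = '"' then ['\\', '"']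
     else if c = '\n' then ['\\', 'n']
     else if c = '\r' then ['\\', 'r']
     else if c = '\t' then ['\\', 't']
     else [c]) := by
  by_cases h1 : c = '\\'
  · subst h1; decide
  by_cases h2 : c = '"'
  · subst h2; decide
  by_cases h3 : c = '\n'
  · subst h3; decide
  by_cases h4 : c = '\r'
  · subst h4; decide
  by_cases h5 : c = '\t'
  · subst h5; decide
  simp [h1, h2, h3, h4, h5]

-- A's foldl with per-element append, flattened, is the flatMap of the per-char piece
theorem luaEsc_foldl_flatten (g : Char → List Char) (cs : List Char) (acc : List (List Char)) :
    (cs.foldl (fun a c => a ++ [g c]) acc).flatten = acc.flatten ++ cs.flatMap g := by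
  induction cs generalizing acc with
  | nil => simp
  | cons c cs ih =>
    rw [List.foldl_cons, ih]
    simp [List.flatMap_cons, List.flatten_append]

theorem lua_escape_string_eq (s : String) :
    lua_escape_string s = lua_escape_string_alt s := by
  unfold lua_escape_string lua_escape_string_alt luaEscPasses
  have hfun : (fun (a : List (List Char)) (c : Char) =>
      if c = '\\' then a ++ [['\\', '\\']]
      else if c = '"' then a ++ [['\\', '"']]
      else if c = '\n' then a ++ [['\\', 'n']]
      else if c = '\r' then a ++ [['\\', 'r']]
      else if c = '\t' then a ++ [['\\', 't']]
      else a ++ [[c]]) =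
      (fun a c => a ++ [(if c = '\\' then ['\\', '\\']
        else if c = '"' then ['\\', '"']
        else if c = '\n' then ['\\', 'n']
        else if c = '\r' then ['\\', 'r']
        else if c = '\t' then ['\\', 't']
        else [c])]) := by
    funext a c
    split_ifs <;> rfl
  rw [hfun]
  have hA := luaEsc_foldl_flatten
    (fun c => (if c = '\\' then ['\\', '\\']
      else if c = '"' then ['\\', '"']
      else if c = '\n' then ['\\', 'n']
      else if c = '\r' then ['\\', 'r']
      else if c = '\t' then ['\\', 't']
      else [c])) s.toList ([] : List (List Char))
  simp only [List.flatten_nil, List.nil_append] at hA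
  -- reduce both sides to lists of characters
  apply String.ext
  simp only [hA, List.foldl_cons, List.foldl_nil, String.toList_append,
    PySem.Str.toList_replace, String.toList_ofList,
    show ("\\" : String).toList = ['\\'] from rfl,
    show ("\\\\" : String).toList = ['\\', '\\'] from rfl,
    show ("\"" : String).toList = ['"'] from rfl,
    show ("\\\"" : String).toList = ['\\', '"'] from rfl,
    show ("\n" : String).toList = ['\n'] from rfl,
    show ("\\n" : String).toList = ['\\', 'n'] from rfl,
    show ("\r" : String).toList = ['\r'] from rfl,
    show ("\\r" : String).toList = ['\\', 'r'] from rfl,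
    show ("\t" : String).toList = ['\t'] from rfl,
    show ("\\t" : String).toList = ['\\', 't'] from rfl]
  simp only [luaEsc_replace1, List.flatMap_assoc]
  have hperm := funext luaEsc_perChar
  simp only [List.flatMap_assoc] at hperm
  rw [← hperm]
  simp

-- ===== VERDICT (by name: the statement is the Claim_ definition above) =====
theorem lua_escape_string_spec : Claim_equal_lua_escape_string := by
  intro s _
  unfold Spec_lua_escape_string
  exact lua_escape_string_eq s
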